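-- pv_equiv track=rewrite | github.com/wu-uk/AutoYara | src/autoyara/collectors/oh_crawler/analysis.py | _apply_hunk_reverse
-- ===== SOURCE A (Python) =====
-- def hunk_sequences_from_body(body):
--     old_seq, new_seq = [], []
--     for raw in body.splitlines():
--         if not raw:
--             continue
--         kind = raw[0]
--         if kind not in " +-":
--             continue
--         code = raw[1:]
--         if kind == " ":
--             old_seq.append(code)
--             new_seq.append(code)
--         elif kind == "+":
--             new_seq.append(code)
--         elif kind == "-":
--             old_seq.append(code)
--     return old_seq, new_seq
--
-- def _apply_hunk_reverse(result_lines: list, body: str) -> list: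
--     """将单个 hunk 的 diff body 逆向应用到 result_lines（fixed→vulnerable）。
--
--     策略：
--     1. 优先用整块匹配：在 result_lines 中定位连续的 new_seq，整块替换为 old_seq。
--     2. 块匹配失败时降级：按 diff body 行序逐组处理连续的 +/- 行段，
--        找到 + 行在 result_lines 里的位置，将该位置处的连续 + 行替换为对应的 - 行。
--     """
--     old_seq, new_seq = hunk_sequences_from_body(body)
--     n = len(new_seq)
--     if n == 0:
--         return result_lines
--
--     # --- 策略1：整块匹配 ---
--     for i in range(len(result_lines) - n + 1):
--         if all(result_lines[i + j].rstrip() == new_seq[j].rstrip() for j in range(n)):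
--             return result_lines[:i] + old_seq + result_lines[i + n :]
--
--     # --- 策略2：按 diff 行序逐段处理 ---
--     # 把 body 解析为"段"：每段是连续的 +/- 行组（夹在上下文行之间）
--     # 段内：+ 行是需要从 result_lines 删除的，- 行是需要插入的
--     segments: list[tuple[list[str], list[str]]] = []  # [(added_lines, removed_lines)]
--     cur_added: list[str] = []
--     cur_removed: list[str] = []
--
--     for raw in body.splitlines():
--         if raw.startswith("\\"):
--             continue
--         if raw.startswith("+"):
--             cur_added.append(raw[1:])
--         elif raw.startswith("-"):
--             cur_removed.append(raw[1:])
--         else: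
--             # 上下文行：flush 当前段
--             if cur_added or cur_removed:
--                 segments.append((cur_added, cur_removed))
--                 cur_added, cur_removed = [], []
--     if cur_added or cur_removed:
--         segments.append((cur_added, cur_removed))
--
--     lines = list(result_lines)
--     for added_lines, removed_lines in segments:
--         if not added_lines:
--             # 纯删除段（diff 里只有 - 行，没有 + 行）：旧代码中有这些行，
--             # 但在 fixed_func 里它们不存在，需要插入
--             # → 找到上下文定位点（跳过，无法精确插入，保持原样）
--             continue
--
--         # 找到 added_lines 在 lines 中的起始位置
--         na = len(added_lines)
--         found = -1
--         for i in range(len(lines) - na + 1):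
--             if all(lines[i + j].rstrip() == added_lines[j].rstrip() for j in range(na)):
--                 found = i
--                 break
--
--         if found >= 0:
--             # 将 found 位置处的 na 个 added 行替换为 removed 行
--             lines = lines[:found] + removed_lines + lines[found + na :]
--
--     return lines
-- ===== SOURCE B (Python) =====
-- def _apply_hunk_reverse(result_lines: list, body: str) -> list:
--     # One fused pass over the body builds old_seq/new_seq AND the +/- segments;
--     # each block search goes through a first-line position index instead of
--     # re-checking every alignment of result_lines (alternative structure, same cost).
--     old_seq, new_seq, segments = [], [], []
--     cur_added, cur_removed = [], []
--
--     def flush():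
--         nonlocal cur_added, cur_removed
--         if cur_added or cur_removed:
--             segments.append((cur_added, cur_removed))
--             cur_added, cur_removed = [], []
--
--     for raw in body.splitlines():
--         k = raw[:1]
--         rest = raw[1:]
--         if k == " ":
--             old_seq.append(rest)
--             new_seq.append(rest)
--             flush()
--         elif k == "+":
--             new_seq.append(rest)
--             cur_added.append(rest)
--         elif k == "-":
--             old_seq.append(rest)
--             cur_removed.append(rest)
--         elif k == "\\":
--             pass
--         else:
--             flush()
--     flush()
--
--     if not new_seq:
--         return result_lines
--
--     def find_first(lines, needle):
--         # first i with lines[i:i+n] == needle (rstrip-normalised), via an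
--         # index of the positions of each distinct stripped line
--         stripped = [s.rstrip() for s in lines]
--         pat = [s.rstrip() for s in needle]
--         index = {}
--         for i, s in enumerate(stripped):
--             index.setdefault(s, []).append(i)
--         n = len(pat)
--         for i in index.get(pat[0], ()):
--             if stripped[i:i + n] == pat:
--                 return i
--         return -1
--
--     i = find_first(result_lines, new_seq)
--     if i >= 0:
--         return result_lines[:i] + old_seq + result_lines[i + len(new_seq):]
--
--     lines = result_lines
--     for added, removed in segments:
--         if not added:
--             continue
--         j = find_first(lines, added)
--         if j >= 0:
--             lines = lines[:j] + removed + lines[j + len(added):]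
--     return lines
-- ===== Notes on version B (the rewrite author's own statement) =====
-- stated objective: alternative
-- what changed: B fuses A's two passes over the diff body into one loop and replaces A's per-alignment rstrip-comparing scan of result_lines by a search that pre-strips the lines once, builds an index of the positions of each distinct stripped line, and only verifies the candidate starts where the first needle line occurs.
import Mathlib
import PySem

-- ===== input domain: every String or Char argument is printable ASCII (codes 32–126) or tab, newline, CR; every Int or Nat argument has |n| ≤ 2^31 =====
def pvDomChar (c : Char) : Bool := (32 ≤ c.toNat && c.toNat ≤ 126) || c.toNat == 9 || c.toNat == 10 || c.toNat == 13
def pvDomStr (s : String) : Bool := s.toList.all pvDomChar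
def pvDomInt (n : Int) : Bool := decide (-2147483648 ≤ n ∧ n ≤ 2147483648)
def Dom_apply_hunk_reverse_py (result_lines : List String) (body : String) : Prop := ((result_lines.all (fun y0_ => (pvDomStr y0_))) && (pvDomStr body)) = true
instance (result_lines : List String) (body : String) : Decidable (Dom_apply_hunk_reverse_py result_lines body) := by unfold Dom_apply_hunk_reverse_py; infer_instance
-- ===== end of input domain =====

-- B replaces A's scan over every alignment (rstrip-comparing line by line at each start) by a
-- first-line position index built once per search, and fuses A's two passes over the diff body
-- into one (objective: alternative — same measured cost on the timed inputs).

-- ===== PORT A =====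
-- one step of hunk_sequences_from_body's loop; `kind not in " +-"` is the three char tests,
-- `code = raw[1:]` is String.ofList of the tail of raw's characters
def pvA_seqStep (st : List String × List String) (raw : String) : List String × List String :=
  match raw.toList with
  | [] => st                                     -- `if not raw: continue`
  | kind :: rest =>
    if kind = ' ' then (st.1 ++ [String.ofList rest], st.2 ++ [String.ofList rest])
    else if kind = '+' then (st.1, st.2 ++ [String.ofList rest])
    else if kind = '-' then (st.1 ++ [String.ofList rest], st.2)
    else st                                      -- kind not in " +-"

def pvA_seqs (body : String) : List String × List String :=
  (PySem.Str.splitlines body).foldl pvA_seqStep ([], [])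

-- `all(xs[i+j].rstrip() == pat[j].rstrip() for j in range(len(pat)))`; every index i+j is in
-- range at the call sites (i ranges over len(xs)-len(pat)+1), so getD's default is never read
def pvA_matchAt (xs : List String) (i : Nat) (pat : List String) : Bool :=
  (List.range pat.length).all
    (fun j => PySem.Str.rstrip (xs.getD (i + j) "") == PySem.Str.rstrip (pat.getD j ""))

-- `for i in range(len(xs) - len(pat) + 1): if all(...): found = i; break` ;
-- Nat truncation in xs.length + 1 - pat.length is exactly Python's empty range
def pvA_find (xs : List String) (pat : List String) : Option Nat :=
  (List.range (xs.length + 1 - pat.length)).find? (fun i => pvA_matchAt xs i pat)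

-- one step of the segment-parsing loop (state: segments, cur_added, cur_removed)
def pvA_segStep (st : List (List String × List String) × List String × List String)
    (raw : String) : List (List String × List String) × List String × List String :=
  match raw.toList with
  | '\\' :: _ => st
  | '+' :: rest => (st.1, st.2.1 ++ [String.ofList rest], st.2.2)
  | '-' :: rest => (st.1, st.2.1, st.2.2 ++ [String.ofList rest])
  | _ => if st.2.1 = [] ∧ st.2.2 = [] then st else (st.1 ++ [(st.2.1, st.2.2)], [], [])

def pvA_segments (body : String) : List (List String × List String) :=
  let st := (PySem.Str.splitlines body).foldl pvA_segStep ([], [], [])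
  if st.2.1 = [] ∧ st.2.2 = [] then st.1 else st.1 ++ [(st.2.1, st.2.2)]

-- the body of `for added_lines, removed_lines in segments: ...` (loop-with-break as find?)
def pvA_applySeg (lines : List String) (seg : List String × List String) : List String :=
  if seg.1 = [] then lines
  else match pvA_find lines seg.1 with
    | some i => lines.take i ++ seg.2 ++ lines.drop (i + seg.1.length)
    | none => lines

def apply_hunk_reverse_py (result_lines : List String) (body : String) : List String :=
  let seqs := pvA_seqs body
  let old_seq := seqs.1
  let new_seq := seqs.2
  if new_seq.length = 0 then result_lines
  else
    match pvA_find result_lines new_seq with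
    | some i => result_lines.take i ++ old_seq ++ result_lines.drop (i + new_seq.length)
    | none => (pvA_segments body).foldl pvA_applySeg result_lines

-- ===== PORT B =====
def pvB_flush (segs : List (List String × List String)) (ca cr : List String) :
    List (List String × List String) × List String × List String :=
  if ca = [] ∧ cr = [] then (segs, ca, cr) else (segs ++ [(ca, cr)], [], [])

-- one step of B's fused parse loop (state: old_seq, new_seq, segments, cur_added, cur_removed)
def pvB_parseStep
    (st : List String × List String × List (List String × List String) × List String × List String)
    (raw : String) :
    List String × List String × List (List String × List String) × List String × List String :=
  match raw.toList with
  | ' ' :: rest =>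
    (st.1 ++ [String.ofList rest], st.2.1 ++ [String.ofList rest],
      pvB_flush st.2.2.1 st.2.2.2.1 st.2.2.2.2)
  | '+' :: rest =>
    (st.1, st.2.1 ++ [String.ofList rest], st.2.2.1, st.2.2.2.1 ++ [String.ofList rest], st.2.2.2.2)
  | '-' :: rest =>
    (st.1 ++ [String.ofList rest], st.2.1, st.2.2.1, st.2.2.2.1, st.2.2.2.2 ++ [String.ofList rest])
  | '\\' :: _ => st
  | _ => (st.1, st.2.1, pvB_flush st.2.2.1 st.2.2.2.1 st.2.2.2.2)

-- `for i, s in enumerate(stripped): index.setdefault(s, []).append(i)` (indices are ≥ 0: Nat)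
def pvB_index (stripped : List String) : PySem.Dict String (List Nat) :=
  (((List.range stripped.length).zip stripped).map (fun p => (p.2, p.1))).foldl
    (fun d p => d.modify p.1 [] (fun v => v ++ [p.2])) ∅

-- find_first: only called with a nonempty needle (pat.headD's default is never read);
-- stripped[i:i+n] for 0 ≤ i is (stripped.drop i).take n
def pvB_find (lines pat0 : List String) : Option Nat :=
  let stripped := lines.map PySem.Str.rstrip
  let pat := pat0.map PySem.Str.rstrip
  let n := pat.length
  ((pvB_index stripped).getD (pat.headD "") []).find?
    (fun i => ((stripped.drop i).take n) == pat)

def pvB_applySeg (lines : List String) (seg : List String × List String) : List String :=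
  if seg.1 = [] then lines
  else match pvB_find lines seg.1 with
    | some j => lines.take j ++ seg.2 ++ lines.drop (j + seg.1.length)
    | none => lines

def apply_hunk_reverse_py_alt (result_lines : List String) (body : String) : List String :=
  let st := (PySem.Str.splitlines body).foldl pvB_parseStep ([], [], [], [], [])
  let old_seq := st.1
  let new_seq := st.2.1
  let segments := (pvB_flush st.2.2.1 st.2.2.2.1 st.2.2.2.2).1
  if new_seq = [] then result_lines
  else
    match pvB_find result_lines new_seq with
    | some i => result_lines.take i ++ old_seq ++ result_lines.drop (i + new_seq.length)
    | none => segments.foldl pvB_applySeg result_lines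

-- ===== PRECONDITION & SPEC =====
def Spec_apply_hunk_reverse_py (result_lines : List String) (body : String) (out : List String) : Prop := out = apply_hunk_reverse_py_alt result_lines body
instance (result_lines : List String) (body : String) (out : List String) : Decidable (Spec_apply_hunk_reverse_py result_lines body out) := by unfold Spec_apply_hunk_reverse_py; infer_instance

-- ===== CLAIM (what is proved, stated in full; the proofs are below) =====
def Claim_equal_apply_hunk_reverse_py : Prop := ∀ (result_lines : List String) (body : String), Dom_apply_hunk_reverse_py result_lines body → Spec_apply_hunk_reverse_py result_lines body (apply_hunk_reverse_py result_lines body)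

-- ===== LEMMAS AND PROOFS =====

theorem pv_step_eq (o n : List String) (s : List (List String × List String))
    (ca cr : List String) (raw : String) :
    pvB_parseStep (o, n, s, ca, cr) raw =
      ((pvA_seqStep (o, n) raw).1, (pvA_seqStep (o, n) raw).2,
        (pvA_segStep (s, ca, cr) raw).1, (pvA_segStep (s, ca, cr) raw).2.1,
        (pvA_segStep (s, ca, cr) raw).2.2) := by
  unfold pvB_parseStep pvA_seqStep pvA_segStep pvB_flush
  rcases h : raw.toList with _ | ⟨c, rest⟩
  · simp
  · by_cases h1 : c = ' ' <;> by_cases h2 : c = '+' <;> by_cases h3 : c = '-' <;>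
      by_cases h4 : c = '\\' <;> simp_all

theorem pv_parse_split (l : List String) (o n : List String)
    (s : List (List String × List String)) (ca cr : List String) :
    l.foldl pvB_parseStep (o, n, s, ca, cr) =
      ((l.foldl pvA_seqStep (o, n)).1, (l.foldl pvA_seqStep (o, n)).2,
        (l.foldl pvA_segStep (s, ca, cr)).1, (l.foldl pvA_segStep (s, ca, cr)).2.1,
        (l.foldl pvA_segStep (s, ca, cr)).2.2) := by
  induction l generalizing o n s ca cr with
  | nil => simp
  | cons raw tl ih =>
    simp only [List.foldl_cons, pv_step_eq, ih]

theorem pv_zip_range (xs : List String) :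
    (List.range xs.length).zip xs = (List.range xs.length).map (fun i => (i, xs.getD i "")) := by
  apply List.ext_getElem
  · simp
  · intro k h1 h2
    simp at h1
    simp [List.getElem_zip, h1]

theorem pv_candidates_eq (stripped : List String) (key : String) :
    (pvB_index stripped).getD key [] =
      (List.range stripped.length).filter (fun i => stripped.getD i "" == key) := by
  unfold pvB_index
  rw [PySem.Dict.getD_foldl_modify_append, pv_zip_range]
  have h0 : (∅ : PySem.Dict String (List Nat)).getD key [] = [] := rfl
  rw [h0]
  simp [List.map_map, List.filter_map, Function.comp_def]

theorem pv_matchAt_eq (lines pat : List String) (i : Nat) (h : i + pat.length ≤ lines.length) :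
    (((lines.map PySem.Str.rstrip).drop i).take pat.length == pat.map PySem.Str.rstrip) =
      pvA_matchAt lines i pat := by
  rw [Bool.eq_iff_iff]
  unfold pvA_matchAt
  simp only [beq_iff_eq, List.all_eq_true, List.mem_range]
  have hlen : (((lines.map PySem.Str.rstrip).drop i).take pat.length).length = pat.length := by
    simp; omega
  constructor
  · intro he j hj
    have h2 : j < (((lines.map PySem.Str.rstrip).drop i).take pat.length).length := by omega
    have h3 : j < (pat.map PySem.Str.rstrip).length := by simpa using hj
    have hg := List.getElem_of_eq he h2
    have hij : i + j < lines.length := by omega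
    simp only [List.getElem_take, List.getElem_drop, List.getElem_map] at hg
    rw [List.getD_eq_getElem _ _ hij, List.getD_eq_getElem _ _ hj]
    simpa using hg
  · intro hp
    apply List.ext_getElem
    · simpa using hlen
    · intro k h1 h2
      have hk : k < pat.length := by simpa using h2
      have hik : i + k < lines.length := by omega
      have := hp k hk
      rw [List.getD_eq_getElem _ _ hik, List.getD_eq_getElem _ _ hk] at this
      simp only [List.getElem_take, List.getElem_drop, List.getElem_map]
      exact this

theorem pv_matchAt_short (lines pat : List String) (i : Nat) (hn : pat ≠ [])
    (h : lines.length < i + pat.length) :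
    (((lines.map PySem.Str.rstrip).drop i).take pat.length == pat.map PySem.Str.rstrip) =
      false := by
  rw [beq_eq_false_iff_ne]
  intro he
  have hpl : pat.length ≠ 0 := by simpa using hn
  have := congrArg List.length he
  simp at this
  omega

theorem pv_find?_congr {l : List Nat} {p q : Nat → Bool} (h : ∀ a ∈ l, p a = q a) :
    l.find? p = l.find? q := by
  induction l with
  | nil => rfl
  | cons x xs ih =>
    have hx := h x (by simp)
    simp only [List.find?_cons, hx]
    cases hq : q x
    · exact ih (fun a ha => h a (by simp [ha]))
    · rfl

theorem pv_find?_range_ext (L a : Nat) (p q : Nat → Bool) (ha : a ≤ L)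
    (h1 : ∀ i, i < a → p i = q i) (h2 : ∀ i, a ≤ i → i < L → p i = false) :
    (List.range L).find? p = (List.range a).find? q := by
  rw [show L = a + (L - a) from by omega, List.range_add, List.find?_append]
  have hnone : List.find? p ((List.range (L - a)).map (fun x => a + x)) = none := by
    rw [List.find?_eq_none]
    intro x hx
    simp only [List.mem_map, List.mem_range] at hx
    obtain ⟨j, hj, rfl⟩ := hx
    simp [h2 (a + j) (by omega) (by omega)]
  rw [hnone, Option.or_none]
  exact pv_find?_congr (by intro i hi; simp only [List.mem_range] at hi; exact h1 i hi)

theorem pv_find_eq (lines pat : List String) (hp : pat ≠ []) :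
    pvB_find lines pat = pvA_find lines pat := by
  rcases pat with _ | ⟨p0, pr⟩
  · exact absurd rfl hp
  unfold pvB_find pvA_find
  simp only [pv_candidates_eq, List.find?_filter, List.length_map, List.map_cons,
    List.headD_cons]
  have hgetD : ∀ i : Nat, i < lines.length →
      (lines.map PySem.Str.rstrip).getD i "" = PySem.Str.rstrip (lines.getD i "") := by
    intro i hi
    rw [List.getD_eq_getElem _ _ (by simpa using hi), List.getD_eq_getElem _ _ hi]
    simp
  have hpt : (p0 :: pr) ≠ ([] : List String) := by simp
  apply pv_find?_range_ext
  · simp only [List.length_cons]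
    omega
  · -- on the indices A's loop visits the two tests agree
    intro i hi
    simp only [List.length_cons] at hi
    have hin : i + (p0 :: pr).length ≤ lines.length := by
      simp only [List.length_cons]
      omega
    have hiL : i < lines.length := by
      simp only [List.length_cons] at hin
      omega
    have hmeq := pv_matchAt_eq lines (p0 :: pr) i hin
    simp only [List.map_cons] at hmeq
    cases hA : pvA_matchAt lines i (p0 :: pr)
    · rw [hA] at hmeq
      simp only [List.length_cons, List.length_map] at hmeq ⊢
      simp [hmeq]
    · rw [hA] at hmeq
      have hj0 : (PySem.Str.rstrip (lines.getD i "") == PySem.Str.rstrip p0) = true := by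
        have h0 := hA
        unfold pvA_matchAt at h0
        rw [List.all_eq_true] at h0
        have h1 := h0 0 (by simp)
        simp only [Nat.add_zero, List.getD_cons_zero] at h1
        exact h1
      simp only [List.length_cons, List.length_map] at hmeq ⊢
      rw [decide_eq_true_eq]
      exact ⟨by rw [hgetD i hiL]; exact hj0, hmeq⟩
  · -- past them, B's slice test is false (the slice is too short)
    intro i hge hiL
    simp only [List.length_cons] at hge
    have hshort := pv_matchAt_short lines (p0 :: pr) i hpt
      (by simp only [List.length_cons]; omega)
    simp only [List.map_cons, List.length_cons, List.length_map] at hshort ⊢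
    simp [hshort]

theorem pv_applySeg_eq : pvB_applySeg = pvA_applySeg := by
  funext lines seg
  unfold pvB_applySeg pvA_applySeg
  by_cases h : seg.1 = []
  · simp [h]
  · rw [if_neg h, if_neg h, pv_find_eq lines seg.1 h]

-- ===== VERDICT (by name: the statement is the Claim_ definition above) =====
theorem apply_hunk_reverse_py_spec : Claim_equal_apply_hunk_reverse_py := by
  intro result_lines body _
  unfold Spec_apply_hunk_reverse_py apply_hunk_reverse_py apply_hunk_reverse_py_alt
    pvA_seqs pvA_segments
  rw [pv_parse_split, pv_applySeg_eq]
  dsimp only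
  set q := (PySem.Str.splitlines body).foldl pvA_seqStep ([], []) with hq
  set t := (PySem.Str.splitlines body).foldl pvA_segStep ([], [], []) with ht
  have hseg : (pvB_flush t.1 t.2.1 t.2.2).1 =
      (if t.2.1 = [] ∧ t.2.2 = [] then t.1 else t.1 ++ [(t.2.1, t.2.2)]) := by
    unfold pvB_flush
    by_cases hc : t.2.1 = [] ∧ t.2.2 = []
    · rw [if_pos hc, if_pos hc]
    · rw [if_neg hc, if_neg hc]
  rw [hseg]
  by_cases h0 : q.2 = []
  · rw [if_pos h0, if_pos (by simp [h0])]
  · rw [if_neg h0, if_neg (by simpa [List.length_eq_zero_iff] using h0),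
      pv_find_eq result_lines q.2 h0]
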